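-- pv_equiv track=rewrite | github.com/FailedMesh/Multi-Agent-RL | predator_prey.py | encoding_to_state
-- ===== SOURCE A (Python) =====
-- def encoding_to_state(encoding):
--     state = ""
--     for i in range(5, 0, -1):
--         remainder = encoding % 5
--         encoding = encoding//5
--         state = str(remainder) + state
--     remainder = encoding % 5
--     state = str(remainder) + state
--     return state
-- ===== SOURCE B (Python) =====
-- def encoding_to_state(encoding):
--     n = encoding % 15625
--     return "".join(str(n // 5**i % 5) for i in range(5, -1, -1))
-- ===== Notes on version B (the rewrite author's own statement) =====
-- stated objective: simpler
-- what changed: B replaces A's running-quotient loop with mutable string/encoding accumulators by one upfront modular reduction followed by a join over the six positional base-five digits, each computed independently by its own power-of-five shift.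
import Mathlib
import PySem

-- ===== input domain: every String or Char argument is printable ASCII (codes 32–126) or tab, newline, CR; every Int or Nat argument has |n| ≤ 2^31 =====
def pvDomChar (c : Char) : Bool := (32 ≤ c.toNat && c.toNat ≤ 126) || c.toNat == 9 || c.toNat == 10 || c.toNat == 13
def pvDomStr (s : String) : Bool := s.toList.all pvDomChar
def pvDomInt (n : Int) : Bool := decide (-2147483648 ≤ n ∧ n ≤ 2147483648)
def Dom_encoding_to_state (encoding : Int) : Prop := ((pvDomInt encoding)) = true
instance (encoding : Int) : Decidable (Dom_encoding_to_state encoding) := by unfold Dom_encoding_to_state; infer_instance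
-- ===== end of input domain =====

-- B reduces the input once modulo the six-digit base-five range, then builds each positional digit independently, instead of A's running-quotient accumulator loop (objective: simpler).

-- ===== PORT A =====
def encoding_to_state (encoding : Int) : String :=
  let st := (PySem.List.pyRange 5 0 (-1)).foldl
    (fun (p : String × Int) _ =>
      let remainder := PySem.Int.mod p.2 5
      let enc := PySem.Int.floordiv p.2 5
      (PySem.Int.toStr remainder ++ p.1, enc)) ("", encoding)
  let remainder := PySem.Int.mod st.2 5
  PySem.Int.toStr remainder ++ st.1

-- ===== PORT B =====
def encoding_to_state_alt (encoding : Int) : String :=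
  let n := PySem.Int.mod encoding 15625
  String.join ((PySem.List.pyRange 5 (-1) (-1)).map
    (fun i => PySem.Int.toStr (PySem.Int.mod (PySem.Int.floordiv n (5 ^ i.toNat)) 5)))

-- ===== PRECONDITION & SPEC =====
def Spec_encoding_to_state (encoding : Int) (out : String) : Prop := out = encoding_to_state_alt encoding
instance (encoding : Int) (out : String) : Decidable (Spec_encoding_to_state encoding out) := by unfold Spec_encoding_to_state; infer_instance

-- ===== CLAIM (what is proved, stated in full; the proofs are below) =====
def Claim_equal_encoding_to_state : Prop := ∀ (encoding : Int), Dom_encoding_to_state encoding → Spec_encoding_to_state encoding (encoding_to_state encoding)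

-- ===== LEMMAS AND PROOFS =====

-- turn PySem floor-div/mod by the positive literals into Lean's ediv/emod
theorem fd (a c : Int) (hc : 0 < c) : PySem.Int.floordiv a c = a / c :=
  PySem.Int.floordiv_eq_ediv_of_pos hc
theorem md (a c : Int) (hc : 0 < c) : PySem.Int.mod a c = a % c :=
  PySem.Int.mod_eq_emod_of_pos hc

-- ===== VERDICT (by name: the statement is the Claim_ definition above) =====
theorem encoding_to_state_spec : Claim_equal_encoding_to_state := by
  intro e _
  unfold Spec_encoding_to_state encoding_to_state encoding_to_state_alt
  have hr : PySem.List.pyRange 5 0 (-1) = [5, 4, 3, 2, 1] := by decide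
  have hr2 : PySem.List.pyRange 5 (-1) (-1) = [5, 4, 3, 2, 1, 0] := by decide
  simp only [hr, hr2, List.foldl, List.map, String.join, List.foldl_cons]
  norm_num [fd, md, show Int.toNat 5 = 5 from rfl, show Int.toNat 4 = 4 from rfl,
            show Int.toNat 3 = 3 from rfl, show Int.toNat 2 = 2 from rfl]
  have d5 : e / 5 / 5 / 5 / 5 / 5 % 5 = e % 15625 / 3125 % 5 := by omega
  have d4 : e / 5 / 5 / 5 / 5 % 5 = e % 15625 / 625 % 5 := by omega
  have d3 : e / 5 / 5 / 5 % 5 = e % 15625 / 125 % 5 := by omega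
  have d2 : e / 5 / 5 % 5 = e % 15625 / 25 % 5 := by omega
  have d1 : e / 5 % 5 = e % 15625 / 5 % 5 := by omega
  rw [d5, d4, d3, d2, d1]
  simp [String.append_assoc]
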